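-- pv_equiv track=rewrite | github.com/kartkbhalodiya/Smart-CITY | cityfix_llm/data/prepare_data.py | apply_typo
-- ===== SOURCE A (Python) =====
-- def apply_typo(word):
--     typo_map = {
--         "a": "s", "s": "a", "i": "u", "o": "p", "e": "r",
--         "n": "m", "t": "y", "r": "t", "l": "k", "d": "s",
--     }
--     if len(word) < 3:
--         return word
--     for c in word:
--         if c in typo_map:
--             return word.replace(c, typo_map[c], 1)
--     return word
-- ===== SOURCE B (Python) =====
-- _TYPO = {
--     "a": "s", "s": "a", "i": "u", "o": "p", "e": "r",
--     "n": "m", "t": "y", "r": "t", "l": "k", "d": "s",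
-- }
--
--
-- def apply_typo(word):
--     if len(word) < 3:
--         return word
--     out = []
--     done = False
--     for c in word:
--         t = _TYPO.get(c)
--         if t is not None and not done:
--             out.append(t)
--             done = True
--         else:
--             out.append(c)
--     return "".join(out)
-- ===== Notes on version B (the rewrite author's own statement) =====
-- stated objective: alternative
-- what changed: A searches for the first mappable character and then calls str.replace (a second scan from the start); B builds the output in a single pass with a done-flag accumulator, substituting the first mappable character in place and never rescanning.
import Mathlib
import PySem

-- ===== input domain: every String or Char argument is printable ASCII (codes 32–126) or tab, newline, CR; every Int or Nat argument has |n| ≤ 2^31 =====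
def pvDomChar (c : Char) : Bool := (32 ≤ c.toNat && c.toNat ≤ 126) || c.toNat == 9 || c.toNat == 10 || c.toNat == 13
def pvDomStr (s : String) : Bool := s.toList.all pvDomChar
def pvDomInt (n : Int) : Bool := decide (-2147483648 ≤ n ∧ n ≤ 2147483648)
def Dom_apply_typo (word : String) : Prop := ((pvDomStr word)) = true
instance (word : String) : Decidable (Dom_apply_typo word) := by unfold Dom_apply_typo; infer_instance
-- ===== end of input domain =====

-- B replaces A's find-then-str.replace (a second scan) with a single pass carrying a done flag; same cost, different structure.

-- ===== PORT A =====
def pvTypoMap : PySem.Dict Char Char :=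
  PySem.Dict.mk [('a','s'), ('s','a'), ('i','u'), ('o','p'), ('e','r'),
                 ('n','m'), ('t','y'), ('r','t'), ('l','k'), ('d','s')]

-- hand port of word.replace(old, new, 1) for a SINGLE-CHAR old: exact — Python replaces the
-- first occurrence of old (PySem has no count-limited replace)
def pvReplaceFirst (c r : Char) : List Char → List Char
  | [] => []
  | x :: xs => if x = c then r :: xs else x :: pvReplaceFirst c r xs

-- the 'for c in word' loop: first char found in typo_map returns word.replace(c, typo_map[c], 1)
def pvALoop (w : List Char) : List Char → List Char
  | [] => w
  | c :: rest =>
    match PySem.Dict.get? pvTypoMap c with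
    | some r => pvReplaceFirst c r w
    | none => pvALoop w rest

def apply_typo (word : String) : String :=
  if PySem.Str.len word < 3 then word
  else String.mk (pvALoop word.toList word.toList)

-- ===== PORT B =====
-- loop body of Source B: t = _TYPO.get(c); if t is not None and not done: append t, set done; else append c
def pvBStep (acc : List Char × Bool) (c : Char) : List Char × Bool :=
  match PySem.Dict.get? pvTypoMap c, acc.2 with
  | some t, false => (acc.1 ++ [t], true)
  | _, _ => (acc.1 ++ [c], acc.2)

def apply_typo_alt (word : String) : String :=
  if PySem.Str.len word < 3 then word
  else String.mk ((word.toList.foldl pvBStep ([], false)).1)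

-- ===== PRECONDITION & SPEC =====
def Spec_apply_typo (word : String) (out : String) : Prop := out = apply_typo_alt word
instance (word : String) (out : String) : Decidable (Spec_apply_typo word out) := by unfold Spec_apply_typo; infer_instance

-- ===== CLAIM (what is proved, stated in full; the proofs are below) =====
def Claim_equal_apply_typo : Prop := ∀ (word : String), Dom_apply_typo word → Spec_apply_typo word (apply_typo word)

-- ===== LEMMAS AND PROOFS =====

-- the common characterisation: first mappable char replaced in place
def pvFix : List Char → List Char
  | [] => []
  | c :: cs =>
    match PySem.Dict.get? pvTypoMap c with
    | some r => r :: cs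
    | none => c :: pvFix cs

theorem pvBfold_done (cs : List Char) (out : List Char) :
    cs.foldl pvBStep (out, true) = (out ++ cs, true) := by
  induction cs generalizing out with
  | nil => simp
  | cons c cs ih =>
    simp only [List.foldl_cons, pvBStep]
    cases h : PySem.Dict.get? pvTypoMap c <;> simp [ih]

theorem pvBfold_eq_fix (cs : List Char) (out : List Char) :
    (cs.foldl pvBStep (out, false)).1 = out ++ pvFix cs := by
  induction cs generalizing out with
  | nil => simp [pvFix]
  | cons c cs ih =>
    simp only [List.foldl_cons, pvBStep, pvFix]
    cases h : PySem.Dict.get? pvTypoMap c with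
    | none => simpa using ih (out ++ [c])
    | some r => simp [pvBfold_done]

theorem pvReplaceFirst_append (c r : Char) (pre cs : List Char) (hc : c ∉ pre) :
    pvReplaceFirst c r (pre ++ c :: cs) = pre ++ r :: cs := by
  induction pre with
  | nil => simp [pvReplaceFirst]
  | cons x xs ih =>
    simp only [List.mem_cons, not_or] at hc
    simp [pvReplaceFirst, Ne.symm hc.1, ih hc.2]

theorem pvALoop_eq_fix (cs : List Char) (pre : List Char)
    (hpre : ∀ x ∈ pre, PySem.Dict.get? pvTypoMap x = none) :
    pvALoop (pre ++ cs) cs = pre ++ pvFix cs := by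
  induction cs generalizing pre with
  | nil => simp [pvALoop, pvFix]
  | cons c cs ih =>
    simp only [pvALoop, pvFix]
    cases h : PySem.Dict.get? pvTypoMap c with
    | some r =>
      have hc : c ∉ pre := fun hmem => by simp [hpre c hmem] at h
      simpa using pvReplaceFirst_append c r pre cs hc
    | none =>
      have : pre ++ c :: cs = (pre ++ [c]) ++ cs := by simp
      rw [this, ih (pre ++ [c]) (by
        intro x hx
        rcases List.mem_append.mp hx with hx | hx
        · exact hpre x hx
        · simp only [List.mem_singleton] at hx; simpa [hx] using h)]
      simp

-- ===== VERDICT (by name: the statement is the Claim_ definition above) =====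
theorem apply_typo_spec : Claim_equal_apply_typo := by
  intro word _
  unfold Spec_apply_typo apply_typo apply_typo_alt
  split_ifs with h
  · rfl
  · rw [pvBfold_eq_fix word.toList []]
    have := pvALoop_eq_fix word.toList [] (by intro x hx; simp at hx)
    simp only [List.nil_append] at this ⊢
    rw [this]
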